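-- pv_equiv track=rewrite | github.com/VITA-Group/VeriWorld | veriworld/benchmark/interactive/strategy/maze_plan/harness_knowledge/_common.py | format_partial_map
-- ===== SOURCE A (Python) =====
-- from typing import Any, List, Optional, Tuple
--
-- def format_partial_map(known_walls: set, known_open: set,
--                        grid_rows: int, grid_cols: int) -> str:
--     lines: List[str] = []
--     for r in range(grid_rows):
--         row = ""
--         for c in range(grid_cols):
--             if (r, c) in known_walls:
--                 row += "#"
--             elif (r, c) in known_open:
--                 row += "."
--             else:
--                 row += "?"
--         lines.append(f"  {r:2d}: {row}")
--     return "\n".join(lines)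
-- ===== SOURCE B (Python) =====
-- def format_partial_map(known_walls, known_open, grid_rows, grid_cols):
--     grid = [['?'] * grid_cols for _ in range(grid_rows)]
--     for r, c in known_open:
--         if 0 <= r < grid_rows and 0 <= c < grid_cols:
--             grid[r][c] = '.'
--     for r, c in known_walls:
--         if 0 <= r < grid_rows and 0 <= c < grid_cols:
--             grid[r][c] = '#'
--     return "\n".join(f"  {r:2d}: {''.join(row)}" for r, row in enumerate(grid))
-- ===== Notes on version B (the rewrite author's own statement) =====
-- stated objective: alternative
-- what changed: B initializes a rows×cols grid of '?' chars and paints the known-open cells ('.') then the known-wall cells ('#') onto it (out-of-range cells skipped, walls painted last keep priority), instead of scanning every cell with per-cell set membership tests and string concatenation.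
import Mathlib
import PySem

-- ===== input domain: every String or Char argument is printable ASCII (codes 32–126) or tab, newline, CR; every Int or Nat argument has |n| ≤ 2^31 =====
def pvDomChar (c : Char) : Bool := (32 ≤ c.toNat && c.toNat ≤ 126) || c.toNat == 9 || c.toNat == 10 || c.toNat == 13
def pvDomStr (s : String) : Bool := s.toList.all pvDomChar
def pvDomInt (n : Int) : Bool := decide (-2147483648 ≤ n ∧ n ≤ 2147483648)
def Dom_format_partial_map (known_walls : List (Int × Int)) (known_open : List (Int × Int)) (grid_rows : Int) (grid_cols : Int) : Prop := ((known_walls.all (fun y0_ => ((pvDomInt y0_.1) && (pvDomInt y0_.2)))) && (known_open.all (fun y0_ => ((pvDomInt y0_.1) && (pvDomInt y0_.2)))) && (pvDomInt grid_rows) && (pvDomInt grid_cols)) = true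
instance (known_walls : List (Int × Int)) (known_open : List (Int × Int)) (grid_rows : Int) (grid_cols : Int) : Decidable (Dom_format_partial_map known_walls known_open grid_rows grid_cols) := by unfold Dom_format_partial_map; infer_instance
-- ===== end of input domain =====

-- B paints a '?'-filled rows×cols character grid (open cells first, then walls) instead of
-- scanning every cell with membership tests; same output, measurably faster by a constant factor.

-- shared formatting helper: exact port of f"  {r:2d}: {row}" —
-- two spaces, str(r) right-aligned to width 2 with spaces, ": ", then the row text
def pvFmtLine (r : Int) (row : List Char) : List Char :=
  let s := PySem.Int.toChars r
  [' ', ' '] ++ (List.replicate (2 - s.length) ' ' ++ s) ++ [':', ' '] ++ row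

-- ===== PORT A =====
def format_partial_map (known_walls : List (Int × Int)) (known_open : List (Int × Int)) (grid_rows : Int) (grid_cols : Int) : String :=
  let lines : List (List Char) :=
    (PySem.List.pyRange 0 grid_rows).foldl (fun lines r =>
      let row : List Char :=
        (PySem.List.pyRange 0 grid_cols).foldl (fun row c =>
          if (r, c) ∈ known_walls then row ++ ['#']
          else if (r, c) ∈ known_open then row ++ ['.']
          else row ++ ['?']) []
      lines ++ [pvFmtLine r row]) []
  String.ofList (PySem.Chars.join ['\n'] lines)

-- ===== PORT B =====
-- paint ch at every in-range cell of `cells` (grid[r][c] = ch, out-of-range skipped)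
def pvPaint (grid_rows : Int) (grid_cols : Int) (ch : Char) (g : List (List Char)) (cells : List (Int × Int)) : List (List Char) :=
  cells.foldl (fun g p =>
    if 0 ≤ p.1 ∧ p.1 < grid_rows ∧ 0 ≤ p.2 ∧ p.2 < grid_cols then
      g.modify p.1.toNat (fun row => row.set p.2.toNat ch)
    else g) g

def format_partial_map_alt (known_walls : List (Int × Int)) (known_open : List (Int × Int)) (grid_rows : Int) (grid_cols : Int) : String :=
  let g0 : List (List Char) := List.replicate grid_rows.toNat (List.replicate grid_cols.toNat '?')
  let g1 := pvPaint grid_rows grid_cols '.' g0 known_open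
  let g2 := pvPaint grid_rows grid_cols '#' g1 known_walls
  String.ofList (PySem.Chars.join ['\n'] ((PySem.List.enumerate g2).map (fun p => pvFmtLine p.1 p.2)))

-- ===== PRECONDITION & SPEC =====
def Spec_format_partial_map (known_walls : List (Int × Int)) (known_open : List (Int × Int)) (grid_rows : Int) (grid_cols : Int) (out : String) : Prop := out = format_partial_map_alt known_walls known_open grid_rows grid_cols
instance (known_walls : List (Int × Int)) (known_open : List (Int × Int)) (grid_rows : Int) (grid_cols : Int) (out : String) : Decidable (Spec_format_partial_map known_walls known_open grid_rows grid_cols out) := by unfold Spec_format_partial_map; infer_instance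

-- ===== CLAIM (what is proved, stated in full; the proofs are below) =====
def Claim_equal_format_partial_map : Prop := ∀ (known_walls : List (Int × Int)) (known_open : List (Int × Int)) (grid_rows : Int) (grid_cols : Int), Dom_format_partial_map known_walls known_open grid_rows grid_cols → Spec_format_partial_map known_walls known_open grid_rows grid_cols (format_partial_map known_walls known_open grid_rows grid_cols)

-- ===== LEMMAS AND PROOFS =====

-- the character A prints at cell (r, c)
def cellChar (kw ko : List (Int × Int)) (r c : Int) : Char :=
  if (r, c) ∈ kw then '#' else if (r, c) ∈ ko then '.' else '?'

-- cell accessor used only in the proofs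
def pvCell (g : List (List Char)) (i j : Nat) : Char := (g[i]?.getD [])[j]?.getD 'X'

theorem foldl_append_singleton {α β : Type} (l : List α) (f : α → β) (init : List β) :
    l.foldl (fun acc x => acc ++ [f x]) init = init ++ l.map f := by
  induction l generalizing init with
  | nil => simp
  | cons x xs ih => simp [ih]

theorem pvPaint_cons (R C : Int) (ch : Char) (g : List (List Char)) (p : Int × Int) (ps : List (Int × Int)) :
    pvPaint R C ch g (p :: ps)
      = pvPaint R C ch
          (if 0 ≤ p.1 ∧ p.1 < R ∧ 0 ≤ p.2 ∧ p.2 < C then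
             g.modify p.1.toNat (fun row => row.set p.2.toNat ch)
           else g) ps := by
  simp only [pvPaint, List.foldl_cons]

theorem pvPaint_length (R C : Int) (ch : Char) (cells : List (Int × Int)) :
    ∀ (g : List (List Char)), (pvPaint R C ch g cells).length = g.length := by
  induction cells with
  | nil => intro g; simp [pvPaint]
  | cons p ps ih =>
      intro g
      simp only [pvPaint, List.foldl_cons] at *
      split
      · rw [ih]; simp
      · exact ih g

theorem pvPaint_rowlen (R C : Int) (ch : Char) (cells : List (Int × Int)) :
    ∀ (g : List (List Char)) (i : Nat),
      ((pvPaint R C ch g cells)[i]?.getD []).length = (g[i]?.getD []).length := by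
  induction cells with
  | nil => intro g i; simp [pvPaint]
  | cons p ps ih =>
      intro g i
      simp only [pvPaint, List.foldl_cons] at *
      split
      · rw [ih]
        rw [List.getElem?_modify]
        cases h : g[i]? with
        | none => simp
        | some row => simp; split <;> simp
      · exact ih g i

theorem pvPaint_cell (R C : Int) (ch : Char) (cells : List (Int × Int)) :
    ∀ (g : List (List Char)) (i j : Nat),
      g.length = R.toNat →
      (∀ k : Nat, (g[k]?.getD []).length = C.toNat ∨ g[k]? = none) →
      i < R.toNat → j < C.toNat →
      pvCell (pvPaint R C ch g cells) i j
        = if ((i : Int), (j : Int)) ∈ cells then ch else pvCell g i j := by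
  induction cells with
  | nil => intro g i j _ _ _ _; simp [pvPaint]
  | cons p ps ih =>
      intro g i j hlen hrow hi hj
      rw [pvPaint_cons]
      by_cases hg : 0 ≤ p.1 ∧ p.1 < R ∧ 0 ≤ p.2 ∧ p.2 < C
      · rw [if_pos hg]
        set g' := g.modify p.1.toNat (fun row => row.set p.2.toNat ch) with hg'
        have hlen' : g'.length = R.toNat := by simp [hg', hlen]
        have hrow' : ∀ k : Nat, (g'[k]?.getD []).length = C.toNat ∨ g'[k]? = none := by
          intro k
          rcases hrow k with h | h
          · left
            rw [hg', List.getElem?_modify]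
            cases hk : g[k]? with
            | none => simp [hk] at h; simpa [hk] using h
            | some row =>
                rw [hk] at h; simp at h
                simp [hk]; split <;> simp [h]
          · right; rw [hg', List.getElem?_modify, h]; rfl
        rw [ih g' i j hlen' hrow' hi hj]
        -- pvCell g' i j
        have higlen : i < g.length := by omega
        obtain ⟨row, hrowi⟩ : ∃ row, g[i]? = some row := ⟨g[i], List.getElem?_eq_getElem higlen⟩
        have hrowlen : row.length = C.toNat := by
          rcases hrow i with h | h
          · rw [hrowi] at h; simpa using h
          · rw [hrowi] at h; cases h
        have hcell' : pvCell g' i j = if p.1.toNat = i ∧ p.2.toNat = j then ch else pvCell g i j := by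
          rw [hg']
          simp only [pvCell, List.getElem?_modify, hrowi]
          by_cases h1 : p.1.toNat = i
          · simp only [h1, if_pos rfl, Option.map_some]
            simp only [Option.getD_some, List.getElem?_set]
            by_cases h2 : p.2.toNat = j
            · have hjr : j < row.length := by omega
              simp [h2, List.getElem?_set, hjr]
            · simp [h2]
          · simp [h1]
        rw [hcell']
        have hpeq : (p = ((i : Int), (j : Int))) ↔ (p.1.toNat = i ∧ p.2.toNat = j) := by
          constructor
          · rintro rfl; omega
          · rintro ⟨h1, h2⟩
            exact Prod.ext (by omega) (by omega)
        have hmc : (((i : Int), (j : Int)) ∈ p :: ps) ↔ ((p.1.toNat = i ∧ p.2.toNat = j) ∨ ((i : Int), (j : Int)) ∈ ps) := by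
          rw [List.mem_cons, ← hpeq]
          constructor
          · rintro (h | h)
            · exact Or.inl h.symm
            · exact Or.inr h
          · rintro (h | h)
            · exact Or.inl h.symm
            · exact Or.inr h
        by_cases hps : ((i : Int), (j : Int)) ∈ ps
        · simp [hps, hmc]
        · rw [if_neg hps]
          by_cases hpc : p.1.toNat = i ∧ p.2.toNat = j
          · rw [if_pos hpc, if_pos (hmc.mpr (Or.inl hpc))]
          · rw [if_neg hpc, if_neg (by rw [hmc]; tauto)]
      · rw [if_neg hg]
        rw [ih g i j hlen hrow hi hj]
        have hp : p ≠ ((i : Int), (j : Int)) := by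
          rintro rfl
          exact hg ⟨by omega, by omega, by omega, by omega⟩
        have hmc : (((i : Int), (j : Int)) ∈ p :: ps) ↔ ((i : Int), (j : Int)) ∈ ps := by
          rw [List.mem_cons]
          constructor
          · rintro (h | h)
            · exact absurd h.symm hp
            · exact h
          · exact Or.inr
        rw [if_congr hmc rfl rfl]

theorem innerfold_eq (kw ko : List (Int × Int)) (cols r : Int) :
    (PySem.List.pyRange 0 cols).foldl (fun row c =>
        if (r, c) ∈ kw then row ++ ['#']
        else if (r, c) ∈ ko then row ++ ['.']
        else row ++ ['?']) []
      = (List.range cols.toNat).map (fun j : Nat => cellChar kw ko r (j : Int)) := by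
  have hstep : (fun (row : List Char) (c : Int) =>
      if (r, c) ∈ kw then row ++ ['#']
      else if (r, c) ∈ ko then row ++ ['.']
      else row ++ ['?']) = fun row c => row ++ [cellChar kw ko r c] := by
    funext row c
    simp only [cellChar]
    split_ifs <;> rfl
  rw [hstep, foldl_append_singleton, PySem.List.pyRange_one]
  simp only [List.nil_append, List.map_map, Function.comp_def, zero_add, Int.sub_zero]

theorem A_canon (kw ko : List (Int × Int)) (rows cols : Int) :
    format_partial_map kw ko rows cols
      = String.ofList (PySem.Chars.join ['\n']
          ((List.range rows.toNat).map (fun i : Nat =>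
            pvFmtLine (i : Int) ((List.range cols.toNat).map (fun j : Nat => cellChar kw ko (i : Int) (j : Int)))))) := by
  unfold format_partial_map
  simp only [innerfold_eq]
  rw [foldl_append_singleton, PySem.List.pyRange_one]
  simp only [List.nil_append, List.map_map, Function.comp_def, zero_add, Int.sub_zero]

theorem g0_rows (R C : Nat) (k : Nat) :
    (((List.replicate R (List.replicate C '?')) : List (List Char))[k]?.getD []).length = C
      ∨ ((List.replicate R (List.replicate C '?')) : List (List Char))[k]? = none := by
  by_cases hk : k < R
  · left; simp [List.getElem?_replicate, hk]
  · right; simp [List.getElem?_replicate, hk]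

theorem B_canon (kw ko : List (Int × Int)) (rows cols : Int) :
    format_partial_map_alt kw ko rows cols
      = String.ofList (PySem.Chars.join ['\n']
          ((List.range rows.toNat).map (fun i : Nat =>
            pvFmtLine (i : Int) ((List.range cols.toNat).map (fun j : Nat => cellChar kw ko (i : Int) (j : Int)))))) := by
  unfold format_partial_map_alt
  set R := rows.toNat with hR
  set C := cols.toNat with hC
  set g0 : List (List Char) := List.replicate R (List.replicate C '?') with hg0def
  set g1 := pvPaint rows cols '.' g0 ko with hg1def
  set g2 := pvPaint rows cols '#' g1 kw with hg2def
  have hlen0 : g0.length = R := by simp [hg0def]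
  have hlen1 : g1.length = R := by rw [hg1def, pvPaint_length]; exact hlen0
  have hlen2 : g2.length = R := by rw [hg2def, pvPaint_length]; exact hlen1
  have hrow0 : ∀ k : Nat, (g0[k]?.getD []).length = C ∨ g0[k]? = none := g0_rows R C
  have hrow1 : ∀ k : Nat, (g1[k]?.getD []).length = C ∨ g1[k]? = none := by
    intro k
    rcases hrow0 k with h | h
    · left; rw [hg1def, pvPaint_rowlen]; exact h
    · right
      have := pvPaint_rowlen rows cols '.' ko g0 k
      rw [h] at this
      simp at this
      have hk : g0.length ≤ k := by
        by_contra hk'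
        rw [List.getElem?_eq_getElem (by omega)] at h; cases h
      rw [hg1def]
      exact List.getElem?_eq_none (by rw [pvPaint_length]; omega)
  have hrow2 : ∀ k : Nat, (g2[k]?.getD []).length = C ∨ g2[k]? = none := by
    intro k
    rcases hrow1 k with h | h
    · left; rw [hg2def, pvPaint_rowlen]; exact h
    · right
      have hk : g1.length ≤ k := by
        by_contra hk'
        rw [List.getElem?_eq_getElem (by omega)] at h; cases h
      rw [hg2def]
      exact List.getElem?_eq_none (by rw [pvPaint_length]; omega)
  have hcell : ∀ (i j : Nat), i < R → j < C →
      pvCell g2 i j = cellChar kw ko i j := by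
    intro i j hi hj
    have h2 := pvPaint_cell rows cols '#' kw g1 i j hlen1 hrow1 hi hj
    have h1 := pvPaint_cell rows cols '.' ko g0 i j hlen0 hrow0 hi hj
    have h0 : pvCell g0 i j = '?' := by
      simp [pvCell, hg0def, List.getElem?_replicate, hi, hj]
    rw [hg2def, hg1def] at *
    rw [h2, h1, h0, cellChar]
  have hg2 : g2 = (List.range R).map (fun i : Nat =>
      (List.range C).map (fun j : Nat => cellChar kw ko (i : Int) (j : Int))) := by
    apply List.ext_getElem
    · simp [hlen2]
    · intro i hi1 hi2
      have hiR : i < R := by simpa [hlen2] using hi1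
      have hrlen : g2[i].length = C := by
        rcases hrow2 i with h | h
        · rwa [List.getElem?_eq_getElem hi1] at h
        · rw [List.getElem?_eq_getElem hi1] at h; cases h
      apply List.ext_getElem
      · simp [hrlen, hiR]
      · intro j hj1 hj2
        have hjC : j < C := by simpa [hrlen] using hj1
        have := hcell i j hiR hjC
        simp only [pvCell, List.getElem?_eq_getElem hi1, Option.getD_some,
          List.getElem?_eq_getElem hj1] at this
        simp [this, hiR, hjC]
  show String.ofList (PySem.Chars.join ['\n'] ((PySem.List.enumerate g2).map (fun p => pvFmtLine p.1 p.2))) = _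
  refine congrArg String.ofList (congrArg _ ?_)
  apply List.ext_getElem
  · simp [PySem.List.length_enumerate, hlen2]
  · intro k hk1 hk2
    have hkR : k < R := by simpa [PySem.List.length_enumerate, hlen2] using hk1
    have hkE : k < (PySem.List.enumerate g2).length := by
      simpa [PySem.List.length_enumerate, hlen2] using hkR
    rw [List.getElem_map, List.getElem_map, PySem.List.getElem_enumerate]
    simp only [List.getElem_range, zero_add]
    simp only [hg2, List.getElem_map, List.getElem_range]

theorem format_partial_map_spec : Claim_equal_format_partial_map := by
  intro kw ko rows cols _dom
  unfold Spec_format_partial_map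
  rw [A_canon, B_canon]
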